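-- pv_equiv track=rewrite | github.com/leaffan/del_stats | backend/previews/get_h2h_games_series_records.py | prepare_h2h_records_of_current_teams
-- ===== SOURCE A (Python) =====
-- CURRENT_TEAMS = [
--     'AEV', 'EBB', 'BHV', 'DEG', 'ING', 'IEC', 'KEC',
--     'KEV', 'MAN', 'RBM', 'NIT', 'SWW', 'STR', 'WOB']
--
-- def prepare_h2h_records_of_current_teams(h2h):
--     """
--     Prepares head-to-head records of current DEL teams suitable for usage on
--     extended stats website.
--     """
--     curr_h2h = dict()
--
--     for key in CURRENT_TEAMS:
--         curr_h2h[key] = dict()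
--         for opp_key in CURRENT_TEAMS:
--             # teams don't play against themselves
--             if opp_key == key:
--                 continue
--             curr_h2h[key][opp_key] = dict()
--             if key not in h2h:
--                 continue
--             if opp_key not in h2h[key]:
--                 continue
--             for home_road_overall in h2h[key][opp_key]:
--                 # setting up prefix for final dictionary keys
--                 prefix = ''
--                 if home_road_overall == 'home':
--                     prefix = 'home_'
--                 elif home_road_overall == 'road':
--                     prefix = 'road_'
--                 for category in h2h[key][opp_key][home_road_overall]:
--                     curr_h2h[key][opp_key]["%s%s" % (prefix, category)] = (
--                         h2h[key][opp_key][home_road_overall][category])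
--
--     return curr_h2h
-- ===== SOURCE B (Python) =====
-- CURRENT_TEAMS = [
--     'AEV', 'EBB', 'BHV', 'DEG', 'ING', 'IEC', 'KEC',
--     'KEV', 'MAN', 'RBM', 'NIT', 'SWW', 'STR', 'WOB']
--
-- PREFIXES = {'home': 'home_', 'road': 'road_'}
--
--
-- def prepare_h2h_records_of_current_teams(h2h):
--     """
--     Flatten the nested records into one stream of (cell, record) tuples,
--     group the stream into per-cell buckets, then materialise the fixed
--     current-team grid purely from the buckets.
--     """
--     flat = [
--         ((key, opp), (PREFIXES.get(section, '') + category, value))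
--         for key, opponents in h2h.items()
--         for opp, sections in opponents.items()
--         for section, categories in sections.items()
--         for category, value in categories.items()]
--     cells = {}
--     for cell, record in flat:
--         cells.setdefault(cell, []).append(record)
--     return {
--         key: {opp: dict(cells.get((key, opp), []))
--               for opp in CURRENT_TEAMS if opp != key}
--         for key in CURRENT_TEAMS}
-- ===== Notes on version B (the rewrite author's own statement) =====
-- stated objective: alternative
-- what changed: A fills nested dicts in one pass over the fixed 14x14 team grid with inline guards and lookups into h2h; B is a three-stage pipeline that flattens the whole input into one stream of (cell, record) tuples, groups the stream into per-cell buckets, and then materialises the grid purely from the buckets.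
import Mathlib
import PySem

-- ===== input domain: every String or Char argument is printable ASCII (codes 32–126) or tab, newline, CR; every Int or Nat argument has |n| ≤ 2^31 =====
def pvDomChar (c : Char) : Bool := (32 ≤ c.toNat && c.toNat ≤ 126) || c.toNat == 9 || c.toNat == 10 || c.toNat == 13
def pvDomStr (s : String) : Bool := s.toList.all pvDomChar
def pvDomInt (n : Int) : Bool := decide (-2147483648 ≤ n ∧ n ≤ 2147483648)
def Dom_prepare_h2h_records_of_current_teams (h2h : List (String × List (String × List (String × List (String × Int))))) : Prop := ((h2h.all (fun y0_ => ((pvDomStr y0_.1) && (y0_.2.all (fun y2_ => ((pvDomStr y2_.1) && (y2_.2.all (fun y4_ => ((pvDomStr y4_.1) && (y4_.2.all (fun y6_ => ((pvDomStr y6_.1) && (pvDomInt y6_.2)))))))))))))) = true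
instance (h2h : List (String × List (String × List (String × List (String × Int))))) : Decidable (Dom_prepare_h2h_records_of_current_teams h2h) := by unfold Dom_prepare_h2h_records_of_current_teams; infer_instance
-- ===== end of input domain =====

-- B flattens the nested input into one stream of (cell, record) tuples, groups the stream
-- into per-cell buckets, then materialises the fixed team grid from the buckets
-- (objective: alternative decomposition, flatten-group-materialise instead of nested in-place filling).

def pvTeams : List String :=
  ["AEV", "EBB", "BHV", "DEG", "ING", "IEC", "KEC",
   "KEV", "MAN", "RBM", "NIT", "SWW", "STR", "WOB"]

-- ===== PORT A =====
def pvPrefixA (hro : String) : String :=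
  if hro == "home" then "home_" else if hro == "road" then "road_" else ""
def pvFillA (hros : List (String × List (String × Int))) : PySem.Dict String Int :=
  (PySem.Dict.mk hros).keys.foldl (fun od hro =>
    (PySem.Dict.mk ((PySem.Dict.mk hros).getD hro [])).keys.foldl (fun od cat =>
      od.insert (pvPrefixA hro ++ cat)
        ((PySem.Dict.mk ((PySem.Dict.mk hros).getD hro [])).getD cat 0)) od)
    PySem.Dict.empty
def prepare_h2h_records_of_current_teams (h2h : List (String × List (String × List (String × List (String × Int))))) : List (String × List (String × List (String × Int))) :=
  (pvTeams.foldl (fun curr key =>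
      curr.insert key
        ((pvTeams.foldl (fun inner opp =>
            if opp == key then inner
            else
              let inner := inner.insert opp PySem.Dict.empty
              match (PySem.Dict.mk h2h).get? key with
              | none => inner
              | some sub =>
                match (PySem.Dict.mk sub).get? opp with
                | none => inner
                | some hros => inner.insert opp (pvFillA hros))
          (PySem.Dict.empty : PySem.Dict String (PySem.Dict String Int))).items.map
            (fun p => (p.1, p.2.items))))
    (PySem.Dict.empty : PySem.Dict String (List (String × List (String × Int))))).items

-- ===== PORT B =====
def pvPrefixes : PySem.Dict String String :=
  PySem.Dict.mk [("home", "home_"), ("road", "road_")]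
def pvFlat (h2h : List (String × List (String × List (String × List (String × Int))))) : List ((String × String) × (String × Int)) :=
  h2h.flatMap (fun kp => kp.2.flatMap (fun op => op.2.flatMap (fun sp =>
    sp.2.map (fun cp => ((kp.1, op.1), (pvPrefixes.getD sp.1 "" ++ cp.1, cp.2))))))
def prepare_h2h_records_of_current_teams_alt (h2h : List (String × List (String × List (String × List (String × Int))))) : List (String × List (String × List (String × Int))) :=
  let flat := pvFlat h2h
  let cells : PySem.Dict (String × String) (List (String × Int)) :=
    flat.foldl (fun c p => c.modify p.1 [] (fun l => l ++ [p.2])) PySem.Dict.empty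
  pvTeams.map (fun key => (key,
    (pvTeams.filter (fun opp => !(opp == key))).map (fun opp =>
      (opp, ((cells.getD (key, opp) []).foldl (fun d r => d.insert r.1 r.2)
              (PySem.Dict.empty : PySem.Dict String Int)).items))))

-- ===== PRECONDITION & SPEC =====
-- A Python dict never carries duplicate keys, so Pre_ restricts the assoc-list encoding
-- to the lists that actually denote dicts: distinct keys at every nesting level.
def Pre_prepare_h2h_records_of_current_teams (h2h : List (String × List (String × List (String × List (String × Int))))) : Prop :=
  (h2h.map Prod.fst).Nodup ∧ ∀ p ∈ h2h, (p.2.map Prod.fst).Nodup ∧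
    ∀ q ∈ p.2, (q.2.map Prod.fst).Nodup ∧ ∀ r ∈ q.2, (r.2.map Prod.fst).Nodup

instance (h2h : List (String × List (String × List (String × List (String × Int))))) : Decidable (Pre_prepare_h2h_records_of_current_teams h2h) := by unfold Pre_prepare_h2h_records_of_current_teams; infer_instance

def pvWitness_prepare_h2h_records_of_current_teams : (List (String × List (String × List (String × List (String × Int))))) :=
  [("AEV", [("KEC", [("home", [("w", 3)]), ("road", [("w", 1)])])])]

def Spec_prepare_h2h_records_of_current_teams (h2h : List (String × List (String × List (String × List (String × Int))))) (out : List (String × List (String × List (String × Int)))) : Prop := out = prepare_h2h_records_of_current_teams_alt h2h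
instance (h2h : List (String × List (String × List (String × List (String × Int))))) (out : List (String × List (String × List (String × Int)))) : Decidable (Spec_prepare_h2h_records_of_current_teams h2h out) := by unfold Spec_prepare_h2h_records_of_current_teams; infer_instance

-- ===== CLAIM (what is proved, stated in full; the proofs are below) =====
def Claim_equal_prepare_h2h_records_of_current_teams : Prop := ∀ (h2h : List (String × List (String × List (String × List (String × Int))))), Dom_prepare_h2h_records_of_current_teams h2h → Pre_prepare_h2h_records_of_current_teams h2h → Spec_prepare_h2h_records_of_current_teams h2h (prepare_h2h_records_of_current_teams h2h)

-- ===== LEMMAS AND PROOFS =====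

def pvOpps (key : String) : List String := pvTeams.filter (fun opp => !(opp == key))
def pvCellA (h2h : List (String × List (String × List (String × List (String × Int))))) (key opp : String) : PySem.Dict String Int :=
  match (PySem.Dict.mk h2h).get? key with
  | none => PySem.Dict.empty
  | some sub =>
    match (PySem.Dict.mk sub).get? opp with
    | none => PySem.Dict.empty
    | some hros => pvFillA hros
def pvCanon (h2h : List (String × List (String × List (String × List (String × Int))))) : List (String × List (String × List (String × Int))) :=
  pvTeams.map (fun key => (key, (pvOpps key).map (fun opp => (opp, (pvCellA h2h key opp).items))))

theorem pvTeams_nodup : pvTeams.Nodup := by decide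

theorem pvA_inner (h2h : List (String × List (String × List (String × List (String × Int))))) (key : String) :
    (pvTeams.foldl (fun inner opp =>
        if opp == key then inner
        else
          let inner := inner.insert opp PySem.Dict.empty
          match (PySem.Dict.mk h2h).get? key with
          | none => inner
          | some sub =>
            match (PySem.Dict.mk sub).get? opp with
            | none => inner
            | some hros => inner.insert opp (pvFillA hros))
      (PySem.Dict.empty : PySem.Dict String (PySem.Dict String Int))).items
    = (pvOpps key).map (fun opp => (opp, pvCellA h2h key opp)) := by
  have hbody : (fun (inner : PySem.Dict String (PySem.Dict String Int)) opp =>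
      if opp == key then inner
      else
        let inner := inner.insert opp PySem.Dict.empty
        match (PySem.Dict.mk h2h).get? key with
        | none => inner
        | some sub =>
          match (PySem.Dict.mk sub).get? opp with
          | none => inner
          | some hros => inner.insert opp (pvFillA hros))
      = (fun inner opp => if ¬(opp = key) then inner.insert opp (pvCellA h2h key opp) else inner) := by
    funext inner opp
    by_cases h : opp = key
    · simp [h]
    · unfold pvCellA
      simp only [beq_iff_eq, if_neg h, if_pos h]
      cases hk : (PySem.Dict.mk h2h).get? key with
      | none => rfl
      | some sub =>
        dsimp only
        cases ho : (PySem.Dict.mk sub).get? opp with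
        | none => rfl
        | some hros => exact PySem.Dict.insert_insert_self _ _ _ _
  rw [hbody, PySem.List.foldl_ite_eq_foldl_filter]
  have hfilt : pvTeams.filter (fun x => decide ¬(x = key)) = pvOpps key := by
    unfold pvOpps
    apply List.filter_congr
    intro x _
    by_cases hx : x = key <;> simp [hx]
  rw [hfilt]
  rw [PySem.Dict.items_foldl_insert_fresh (pvOpps key) (fun a => a)
    (fun opp => pvCellA h2h key opp) PySem.Dict.empty
    (by intro a _; simp [PySem.Dict.contains_empty])
    (by simpa using (pvTeams_nodup.filter _))]
  simp [PySem.Dict.empty]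

theorem pvA_eq_canon (h2h : List (String × List (String × List (String × List (String × Int))))) :
    prepare_h2h_records_of_current_teams h2h = pvCanon h2h := by
  unfold prepare_h2h_records_of_current_teams pvCanon
  rw [PySem.Dict.items_foldl_insert_fresh (ν := List (String × List (String × Int))) pvTeams (fun a => a) _ PySem.Dict.empty
    (by intro a _; simp [PySem.Dict.contains_empty])
    (by simpa using pvTeams_nodup)]
  simp only [PySem.Dict.empty, List.nil_append]
  apply List.map_congr_left
  intro key _
  have h := congrArg (fun l => (key, List.map (fun (p : String × PySem.Dict String Int) => (p.1, p.2.items)) l)) (pvA_inner h2h key)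
  simpa [List.map_map, Function.comp] using h

-- the pair-level fill that the flattened fold reduces to
def pvFillB (od : PySem.Dict String Int) (sections : List (String × List (String × Int))) : PySem.Dict String Int :=
  sections.foldl (fun od sp =>
    sp.2.foldl (fun od cp => od.insert (pvPrefixes.getD sp.1 "" ++ cp.1) cp.2) od) od

theorem pvPrefix_eq (s : String) : pvPrefixes.getD s "" = pvPrefixA s := by
  unfold pvPrefixes pvPrefixA PySem.Dict.getD
  rw [PySem.Dict.get?_mk_cons, PySem.Dict.get?_mk_cons]
  by_cases h1 : s = "home"
  · simp [h1]
  · by_cases h2 : s = "road"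
    · simp [h2]
    · simp [h1, h2, PySem.Dict.get?, Ne.symm h1, Ne.symm h2]

-- iterating the KEYS of a nodup assoc list, looking each value up, is iterating the PAIRS
theorem pvKeysFold {ν β : Type} (d0 : ν) (g : β → String → ν → β) :
    ∀ (m : List (String × ν)) (acc : β), (m.map Prod.fst).Nodup →
    (PySem.Dict.mk m).keys.foldl (fun acc k => g acc k ((PySem.Dict.mk m).getD k d0)) acc
      = m.foldl (fun acc p => g acc p.1 p.2) acc := by
  intro m
  induction m with
  | nil => intro acc _; rfl
  | cons p t ih =>
    intro acc hnd
    have hnd1 : p.1 ∉ t.map Prod.fst := (List.nodup_cons.mp hnd).1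
    have hndt : (t.map Prod.fst).Nodup := (List.nodup_cons.mp hnd).2
    rw [show (PySem.Dict.mk (p :: t)).keys = p.1 :: t.map Prod.fst from rfl]
    simp only [List.foldl_cons]
    have hget : ∀ x : String, (PySem.Dict.mk (p :: t)).get? x
        = if (p.1 == x) = true then some p.2 else (PySem.Dict.mk t).get? x :=
      fun x => PySem.Dict.get?_mk_cons p.1 p.2 t x
    have hhead : (PySem.Dict.mk (p :: t)).getD p.1 d0 = p.2 := by
      simp [PySem.Dict.getD, hget p.1]
    rw [hhead]
    have hcong : (t.map Prod.fst).foldl (fun acc k => g acc k ((PySem.Dict.mk (p :: t)).getD k d0)) (g acc p.1 p.2)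
        = (t.map Prod.fst).foldl (fun acc k => g acc k ((PySem.Dict.mk t).getD k d0)) (g acc p.1 p.2) := by
      apply PySem.List.foldl_congr_mem
      intro a k hk
      have hne : (p.1 == k) = false := by
        simp only [beq_eq_false_iff_ne, ne_eq]
        intro hc
        exact hnd1 (hc ▸ hk)
      rw [show (PySem.Dict.mk (p :: t)).getD k d0 = (PySem.Dict.mk t).getD k d0 by
        simp [PySem.Dict.getD, hget k, hne]]
    rw [hcong]
    have := ih (g acc p.1 p.2) hndt
    rw [show (PySem.Dict.mk t).keys = t.map Prod.fst from rfl] at this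
    exact this

theorem pvFill_eq (hros : List (String × List (String × Int)))
    (h3 : (hros.map Prod.fst).Nodup) (h4 : ∀ r ∈ hros, (r.2.map Prod.fst).Nodup) :
    pvFillA hros = pvFillB PySem.Dict.empty hros := by
  unfold pvFillA pvFillB
  rw [pvKeysFold ([] : List (String × Int))
    (fun od hro cats => (PySem.Dict.mk cats).keys.foldl (fun od cat =>
      od.insert (pvPrefixA hro ++ cat) ((PySem.Dict.mk cats).getD cat 0)) od) hros PySem.Dict.empty h3]
  apply PySem.List.foldl_congr_mem
  intro od p hp
  rw [pvKeysFold (0 : Int) (fun od cat v => od.insert (pvPrefixA p.1 ++ cat) v) p.2 od (h4 p hp)]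
  apply PySem.List.foldl_congr_mem
  intro od2 cp _
  simp [pvPrefix_eq]

-- the per-cell tuple stream of one source entry
def pvTuples (key opp : String) (hros : List (String × List (String × Int))) : List ((String × String) × (String × Int)) :=
  hros.flatMap (fun sp => sp.2.map (fun cp => ((key, opp), (pvPrefixes.getD sp.1 "" ++ cp.1, cp.2))))

theorem pvFlat_cons (kp : String × List (String × List (String × List (String × Int))))
    (t : List (String × List (String × List (String × List (String × Int))))) :
    pvFlat (kp :: t)
      = kp.2.flatMap (fun op => pvTuples kp.1 op.1 op.2) ++ pvFlat t := by
  simp [pvFlat, pvTuples]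

theorem pvFilter_tuples_self (key opp : String) (hros : List (String × List (String × Int))) :
    (pvTuples key opp hros).filter (fun t => t.1 == (key, opp)) = pvTuples key opp hros := by
  rw [List.filter_eq_self]
  intro a ha
  simp only [pvTuples, List.mem_flatMap, List.mem_map] at ha
  obtain ⟨sp, _, cp, _, rfl⟩ := ha
  simp

theorem pvFilter_tuples_ne (key opp k o : String) (hros : List (String × List (String × Int)))
    (h : ¬(k = key ∧ o = opp)) :
    (pvTuples k o hros).filter (fun t => t.1 == (key, opp)) = [] := by
  rw [List.filter_eq_nil_iff]
  intro a ha
  simp only [pvTuples, List.mem_flatMap, List.mem_map] at ha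
  obtain ⟨sp, _, cp, _, rfl⟩ := ha
  simp only [beq_iff_eq, Prod.mk.injEq, not_and]
  intro h1 h2
  exact h ⟨h1, h2⟩

theorem pvFilter_level2 (key opp : String) :
    ∀ (sub : List (String × List (String × List (String × Int)))),
    (sub.map Prod.fst).Nodup →
    (sub.flatMap (fun op => pvTuples key op.1 op.2)).filter (fun t => t.1 == (key, opp))
      = (match (PySem.Dict.mk sub).get? opp with
         | none => []
         | some hros => pvTuples key opp hros) := by
  intro sub
  induction sub with
  | nil => intro _; rfl
  | cons op t ih =>
    intro hnd
    have hnd1 : op.1 ∉ t.map Prod.fst := (List.nodup_cons.mp hnd).1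
    have hndt : (t.map Prod.fst).Nodup := (List.nodup_cons.mp hnd).2
    rw [List.flatMap_cons, List.filter_append, ih hndt]
    rw [show (PySem.Dict.mk (op :: t)).get? opp
        = if (op.1 == opp) = true then some op.2 else (PySem.Dict.mk t).get? opp
      from PySem.Dict.get?_mk_cons op.1 op.2 t opp]
    by_cases he : op.1 = opp
    · rw [if_pos (by simp [he])]
      subst he
      rw [pvFilter_tuples_self]
      have hnone : (PySem.Dict.mk t).get? op.1 = none := by
        cases hc : (PySem.Dict.mk t).get? op.1 with
        | none => rfl
        | some v =>
          exact absurd (List.mem_map_of_mem (PySem.Dict.mem_items_of_get?_eq_some _ hc)) hnd1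
      rw [hnone, List.append_nil]
    · rw [if_neg (by simp [he])]
      rw [pvFilter_tuples_ne key opp key op.1 op.2 (fun hc => he hc.2)]
      rw [List.nil_append]

theorem pvFilter_flat (key opp : String) :
    ∀ (h2h : List (String × List (String × List (String × List (String × Int))))),
    (h2h.map Prod.fst).Nodup → (∀ p ∈ h2h, (p.2.map Prod.fst).Nodup) →
    (pvFlat h2h).filter (fun t => t.1 == (key, opp))
      = (match (PySem.Dict.mk h2h).get? key with
         | none => []
         | some sub =>
           match (PySem.Dict.mk sub).get? opp with
           | none => []
           | some hros => pvTuples key opp hros) := by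
  intro h2h
  induction h2h with
  | nil => intro _ _; rfl
  | cons kp t ih =>
    intro hnd hin
    have hnd1 : kp.1 ∉ t.map Prod.fst := (List.nodup_cons.mp hnd).1
    have hndt : (t.map Prod.fst).Nodup := (List.nodup_cons.mp hnd).2
    rw [pvFlat_cons, List.filter_append, ih hndt (fun p hp => hin p (List.mem_cons_of_mem _ hp))]
    rw [show (PySem.Dict.mk (kp :: t)).get? key
        = if (kp.1 == key) = true then some kp.2 else (PySem.Dict.mk t).get? key
      from PySem.Dict.get?_mk_cons kp.1 kp.2 t key]
    by_cases he : kp.1 = key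
    · rw [if_pos (by simp [he])]
      subst he
      have hnone : (PySem.Dict.mk t).get? kp.1 = none := by
        cases hc : (PySem.Dict.mk t).get? kp.1 with
        | none => rfl
        | some v =>
          exact absurd (List.mem_map_of_mem (PySem.Dict.mem_items_of_get?_eq_some _ hc)) hnd1
      rw [hnone]
      rw [pvFilter_level2 kp.1 opp kp.2 (hin kp List.mem_cons_self)]
      cases hc : (PySem.Dict.mk kp.2).get? opp <;> simp [hc]
    · rw [if_neg (by simp [he])]
      have hfst : (kp.2.flatMap (fun op => pvTuples kp.1 op.1 op.2)).filter
          (fun t => t.1 == (key, opp)) = [] := by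
        rw [List.filter_eq_nil_iff]
        intro a ha
        simp only [List.mem_flatMap, pvTuples, List.mem_map] at ha
        obtain ⟨op, _, sp, _, cp, _, rfl⟩ := ha
        simp [he]
      rw [hfst, List.nil_append]

theorem pvFold_tuples (key opp : String) (hros : List (String × List (String × Int)))
    (od : PySem.Dict String Int) :
    ((pvTuples key opp hros).map (fun x => x.2)).foldl (fun d r => d.insert r.1 r.2) od = pvFillB od hros := by
  unfold pvTuples pvFillB
  induction hros generalizing od with
  | nil => rfl
  | cons sp t ih =>
    have hhead : ((List.map (fun cp => ((key, opp), (pvPrefixes.getD sp.1 "" ++ cp.1, cp.2))) sp.2).map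
          (fun x : (String × String) × (String × Int) => x.2)).foldl (fun d r => d.insert r.1 r.2) od
        = sp.2.foldl (fun od cp => od.insert (pvPrefixes.getD sp.1 "" ++ cp.1) cp.2) od := by
      rw [List.map_map, List.foldl_map]; rfl
    rw [List.flatMap_cons, List.map_append, List.foldl_append, List.foldl_cons, hhead]
    exact ih _

theorem pvB_eq_canon (h2h : List (String × List (String × List (String × List (String × Int)))))
    (hpre : Pre_prepare_h2h_records_of_current_teams h2h) :
    prepare_h2h_records_of_current_teams_alt h2h = pvCanon h2h := by
  obtain ⟨hnd1, hrest⟩ := hpre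
  unfold prepare_h2h_records_of_current_teams_alt pvCanon
  dsimp only
  apply List.map_congr_left
  intro key _
  refine congrArg (fun l => (key, l)) ?_
  apply List.map_congr_left
  intro opp _
  refine congrArg (fun d => (opp, d)) ?_
  refine congrArg PySem.Dict.items ?_
  rw [PySem.Dict.getD_foldl_modify_append]
  rw [show (PySem.Dict.empty : PySem.Dict (String × String) (List (String × Int))).getD (key, opp) [] = [] from rfl,
      List.nil_append]
  rw [pvFilter_flat key opp h2h hnd1 (fun p hp => (hrest p hp).1)]
  unfold pvCellA
  cases hk : (PySem.Dict.mk h2h).get? key with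
  | none => rfl
  | some sub =>
    dsimp only
    cases ho : (PySem.Dict.mk sub).get? opp with
    | none => rfl
    | some hros =>
      dsimp only
      rw [pvFold_tuples]
      have hmemsub : (key, sub) ∈ h2h := PySem.Dict.mem_items_of_get?_eq_some _ hk
      have hsub := hrest (key, sub) hmemsub
      have hmemhros : (opp, hros) ∈ sub := PySem.Dict.mem_items_of_get?_eq_some _ ho
      have hhros := hsub.2 (opp, hros) hmemhros
      exact (pvFill_eq hros hhros.1 (fun r hr => hhros.2 r hr)).symm

-- ===== VERDICT (by name: the statement is the Claim_ definition above) =====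
theorem prepare_h2h_records_of_current_teams_spec : Claim_equal_prepare_h2h_records_of_current_teams := by
  intro h2h _hdom hpre
  unfold Spec_prepare_h2h_records_of_current_teams
  rw [pvA_eq_canon, pvB_eq_canon h2h hpre]
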